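-- pv_equiv track=rewrite | github.com/kopok2/Algorithms | DynamicProgramming/MinimumInitialPoints.py | mip
-- ===== SOURCE A (Python) =====
-- def mip(way):
--     r = len(way)
--     c = len(way[0])
--     dp = [[0 for x in range(c)] for y in range(r)]
--     m = r
--     n = c
--     dp[m - 1][n - 1] = 1 if way[m - 1][n - 1] > 0 else abs(way[m - 1][n - 1]) + 1
--     for i in range(m - 2, -1, -1):
--         dp[i][n - 1] = max(dp[i + 1][n - 1] - way[i][n - 1], 1)
--     for j in range(n - 2, -1, -1):
--         dp[m - 1][j] = max(dp[m - 1][j + 1] - way[m - 1][j], 1)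
--     for i in range(m - 2, -1, -1):
--         for j in range(n - 2, -1, -1):
--             mex = min(dp[i + 1][j], dp[i][j + 1])
--             dp[i][j] = max(mex - way[i][j], 1)
--     return dp[0][0]
-- ===== SOURCE B (Python) =====
-- def mip(way):
--     # Top-down memoized recursion: the need at (i, j) is defined directly by the
--     # recurrence and computed on demand, depth-first, instead of filling a table
--     # bottom-up in staged passes.
--     r, c = len(way), len(way[0])
--     memo = {}
--
--     def need(i, j):
--         if (i, j) in memo:
--             return memo[(i, j)]
--         if i == r - 1 and j == c - 1:
--             res = max(1 - way[i][j], 1)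
--         elif i == r - 1:
--             res = max(need(i, j + 1) - way[i][j], 1)
--         elif j == c - 1:
--             res = max(need(i + 1, j) - way[i][j], 1)
--         else:
--             res = max(min(need(i + 1, j), need(i, j + 1)) - way[i][j], 1)
--         memo[(i, j)] = res
--         return res
--
--     return need(0, 0)
-- ===== Notes on version B (the rewrite author's own statement) =====
-- stated objective: alternative
-- what changed: A fills a full r-by-c dp table bottom-up in four staged imperative passes (corner, last column, last row, interior nested loop); B computes the same quantity by top-down memoized recursion on the cell recurrence, depth-first from (0,0), with no table, no staged passes and no index loops.
import Mathlib
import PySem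

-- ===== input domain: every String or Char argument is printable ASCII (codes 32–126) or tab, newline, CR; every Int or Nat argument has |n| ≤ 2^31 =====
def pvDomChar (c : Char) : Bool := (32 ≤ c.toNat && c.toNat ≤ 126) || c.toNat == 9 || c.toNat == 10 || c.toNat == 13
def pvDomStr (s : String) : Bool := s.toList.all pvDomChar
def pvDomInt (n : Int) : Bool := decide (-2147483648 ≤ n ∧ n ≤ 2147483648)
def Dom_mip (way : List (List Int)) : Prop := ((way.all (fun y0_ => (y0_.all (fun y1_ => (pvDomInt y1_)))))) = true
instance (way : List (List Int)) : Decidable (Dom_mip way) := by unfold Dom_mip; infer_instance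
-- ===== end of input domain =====

-- B replaces A's bottom-up table (filled in four staged passes) by top-down memoized
-- recursion on the cell recurrence; same return value on Pre_.

-- 2-D read / write on a list-of-lists grid (Python dp[i][j]; every index the ports use is
-- in range under Pre_, where getD/set are exact).
def g2 (dp : List (List Int)) (i j : Nat) : Int := (dp.getD i []).getD j 0
def s2 (dp : List (List Int)) (i j : Nat) (v : Int) : List (List Int) :=
  dp.set i ((dp.getD i []).set j v)

-- ===== PORT A =====
def mip (way : List (List Int)) : Int :=
  let r := way.length
  let c := (way.getD 0 []).length
  let dp0 : List (List Int) :=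
    (List.range r).map (fun _ => (List.range c).map (fun _ => (0 : Int)))
  let m := r
  let n := c
  let dp1 := s2 dp0 (m - 1) (n - 1)
      (if g2 way (m - 1) (n - 1) > 0 then 1 else |g2 way (m - 1) (n - 1)| + 1)
  let dp2 := (PySem.List.pyRange ((m : Int) - 2) (-1) (-1)).foldl (fun dp i =>
      s2 dp i.toNat (n - 1) (max (g2 dp (i.toNat + 1) (n - 1) - g2 way i.toNat (n - 1)) 1)) dp1
  let dp3 := (PySem.List.pyRange ((n : Int) - 2) (-1) (-1)).foldl (fun dp j =>
      s2 dp (m - 1) j.toNat (max (g2 dp (m - 1) (j.toNat + 1) - g2 way (m - 1) j.toNat) 1)) dp2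
  let dp4 := (PySem.List.pyRange ((m : Int) - 2) (-1) (-1)).foldl (fun dp i =>
      (PySem.List.pyRange ((n : Int) - 2) (-1) (-1)).foldl (fun dp j =>
        let mex := min (g2 dp (i.toNat + 1) j.toNat) (g2 dp i.toNat (j.toNat + 1))
        s2 dp i.toNat j.toNat (max (mex - g2 way i.toNat j.toNat) 1)) dp) dp3
  g2 dp4 0 0

-- ===== PORT B =====
-- B's inner function 'need': memoized recursion on the cell (i, j). The in-range
-- hypotheses hi/hj only justify termination (Python's recursion terminates for the
-- same reason); the computation is exactly Source B's.
def needGo (w : List (List Int)) (r c : Nat) (i j : Nat) (hi : i < r) (hj : j < c)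
    (memo : PySem.Dict (Nat × Nat) Int) : Int × PySem.Dict (Nat × Nat) Int :=
  match memo.get? (i, j) with
  | some v => (v, memo)
  | none =>
    let p : Int × PySem.Dict (Nat × Nat) Int :=
      if h1 : i = r - 1 ∧ j = c - 1 then
        (max (1 - g2 w i j) 1, memo)
      else if h2 : i = r - 1 then
        let q := needGo w r c i (j + 1) hi (by omega) memo
        (max (q.1 - g2 w i j) 1, q.2)
      else if h3 : j = c - 1 then
        let q := needGo w r c (i + 1) j (by omega) hj memo
        (max (q.1 - g2 w i j) 1, q.2)
      else
        let q1 := needGo w r c (i + 1) j (by omega) hj memo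
        let q2 := needGo w r c i (j + 1) hi (by omega) q1.2
        (max (min q1.1 q2.1 - g2 w i j) 1, q2.2)
    (p.1, p.2.insert (i, j) p.1)
termination_by (r - i) + (c - j)
decreasing_by all_goals omega

def mip_alt (way : List (List Int)) : Int :=
  let r := way.length
  let c := (way.getD 0 []).length
  -- the (0 < r ∧ 0 < c) guard only makes the call well-formed; Pre_ guarantees it
  if h : 0 < r ∧ 0 < c then (needGo way r c 0 0 h.1 h.2 PySem.Dict.empty).1 else 0

-- ===== PRECONDITION & SPEC =====
-- Pre_ admits exactly the inputs on which the Python A returns: a non-empty grid whose first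
-- row is non-empty and whose rows are at least as long as the first (otherwise A raises
-- IndexError, and so does B).
def Pre_mip (way : List (List Int)) : Prop :=
  way ≠ [] ∧ 1 ≤ (way.getD 0 []).length ∧
    ∀ row ∈ way, (way.getD 0 []).length ≤ row.length
instance (way : List (List Int)) : Decidable (Pre_mip way) := by unfold Pre_mip; infer_instance

def pvWitness_mip : List (List Int) := [[-2, 3, 1], [1, -1, -4]]

def Spec_mip (way : List (List Int)) (out : Int) : Prop := out = mip_alt way
instance (way : List (List Int)) (out : Int) : Decidable (Spec_mip way out) := by unfold Spec_mip; infer_instance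

-- ===== CLAIM (what is proved, stated in full; the proofs are below) =====
def Claim_equal_mip : Prop := ∀ (way : List (List Int)), Dom_mip way → Pre_mip way → Spec_mip way (mip way)

-- ===== LEMMAS AND PROOFS =====

-- The minimum points needed on entering cell (i,j): recursion from the bottom-right corner.
def F (w : List (List Int)) (i j : Nat) : Int :=
  if i + 1 = w.length then
    if j + 1 = (w.getD 0 []).length then max (1 - g2 w i j) 1
    else if _h : j + 1 < (w.getD 0 []).length then max (F w i (j + 1) - g2 w i j) 1
    else 0
  else if _h : i + 1 < w.length then
    if j + 1 = (w.getD 0 []).length then max (F w (i + 1) j - g2 w i j) 1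
    else if _h2 : j + 1 < (w.getD 0 []).length then
      max (min (F w (i + 1) j) (F w i (j + 1)) - g2 w i j) 1
    else 0
  else 0
termination_by (w.length - i) + ((w.getD 0 []).length - j)
decreasing_by all_goals omega

theorem F_corner {w : List (List Int)} {i j : Nat} (hi : i + 1 = w.length)
    (hj : j + 1 = (w.getD 0 []).length) : F w i j = max (1 - g2 w i j) 1 := by
  rw [F, if_pos hi, if_pos hj]

theorem F_lastrow {w : List (List Int)} {i j : Nat} (hi : i + 1 = w.length)
    (hj : j + 1 < (w.getD 0 []).length) : F w i j = max (F w i (j + 1) - g2 w i j) 1 := by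
  rw [F, if_pos hi, if_neg (by omega), dif_pos hj]

theorem F_lastcol {w : List (List Int)} {i j : Nat} (hi : i + 1 < w.length)
    (hj : j + 1 = (w.getD 0 []).length) : F w i j = max (F w (i + 1) j - g2 w i j) 1 := by
  rw [F, if_neg (by omega), dif_pos hi, if_pos hj]

theorem F_inner {w : List (List Int)} {i j : Nat} (hi : i + 1 < w.length)
    (hj : j + 1 < (w.getD 0 []).length) :
    F w i j = max (min (F w (i + 1) j) (F w i (j + 1)) - g2 w i j) 1 := by
  rw [F, if_neg (by omega), dif_pos hi, if_neg (by omega), dif_pos hj]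

-- ---- B's memoized recursion computes F ----

-- the memo invariant: every stored value is F at its key
def MemoInv (w : List (List Int)) (memo : PySem.Dict (Nat × Nat) Int) : Prop :=
  ∀ p v, memo.get? p = some v → v = F w p.1 p.2

theorem inv_insert {w : List (List Int)} {memo : PySem.Dict (Nat × Nat) Int}
    (h : MemoInv w memo) {i j : Nat} {v : Int} (hv : v = F w i j) :
    MemoInv w (memo.insert (i, j) v) := by
  intro p u hu
  rw [PySem.Dict.get?_insert] at hu
  by_cases hp : p = (i, j)
  · rw [if_pos hp] at hu
    cases hu
    subst hp
    exact hv
  · rw [if_neg hp] at hu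
    exact h p u hu

theorem needGo_spec (w : List (List Int)) :
    ∀ n i j (hi : i < w.length) (hj : j < (w.getD 0 []).length)
      (memo : PySem.Dict (Nat × Nat) Int),
      (w.length - i) + ((w.getD 0 []).length - j) ≤ n → MemoInv w memo →
      (needGo w w.length (w.getD 0 []).length i j hi hj memo).1 = F w i j ∧
      MemoInv w (needGo w w.length (w.getD 0 []).length i j hi hj memo).2 := by
  intro n
  induction n with
  | zero => intro i j hi hj memo hn; omega
  | succ m ih =>
    intro i j hi hj memo hn hinv
    rw [needGo]
    cases hget : memo.get? (i, j) with
    | some v =>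
      simp only
      exact ⟨hinv (i, j) v hget, hinv⟩
    | none =>
      simp only
      by_cases h1 : i = w.length - 1 ∧ j = (w.getD 0 []).length - 1
      · rw [dif_pos h1]
        have hF : max (1 - g2 w i j) 1 = F w i j :=
          (F_corner (by omega) (by omega)).symm
        exact ⟨hF, inv_insert hinv hF⟩
      · rw [dif_neg h1]
        by_cases h2 : i = w.length - 1
        · rw [dif_pos h2]
          obtain ⟨e1, e2⟩ := ih i (j + 1) hi (by omega) memo (by omega) hinv
          have hF : max ((needGo w w.length (w.getD 0 []).length i (j + 1) hi
              (by omega) memo).1 - g2 w i j) 1 = F w i j := by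
            rw [e1, ← F_lastrow (by omega) (by omega)]
          exact ⟨hF, inv_insert e2 hF⟩
        · rw [dif_neg h2]
          by_cases h3 : j = (w.getD 0 []).length - 1
          · rw [dif_pos h3]
            obtain ⟨e1, e2⟩ := ih (i + 1) j (by omega) hj memo (by omega) hinv
            have hF : max ((needGo w w.length (w.getD 0 []).length (i + 1) j
                (by omega) hj memo).1 - g2 w i j) 1 = F w i j := by
              rw [e1, ← F_lastcol (by omega) (by omega)]
            exact ⟨hF, inv_insert e2 hF⟩
          · rw [dif_neg h3]
            obtain ⟨e1, e2⟩ := ih (i + 1) j (by omega) hj memo (by omega) hinv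
            obtain ⟨f1, f2⟩ := ih i (j + 1) hi (by omega)
              (needGo w w.length (w.getD 0 []).length (i + 1) j (by omega) hj memo).2
              (by omega) e2
            have hF : max (min
                (needGo w w.length (w.getD 0 []).length (i + 1) j (by omega) hj memo).1
                (needGo w w.length (w.getD 0 []).length i (j + 1) hi (by omega)
                  (needGo w w.length (w.getD 0 []).length (i + 1) j (by omega) hj memo).2).1
                - g2 w i j) 1 = F w i j := by
              rw [e1, f1, ← F_inner (by omega) (by omega)]
            exact ⟨hF, inv_insert f2 hF⟩

theorem mip_alt_eq (w : List (List Int)) (hr : 1 ≤ w.length) (hc : 1 ≤ (w.getD 0 []).length) :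
    mip_alt w = F w 0 0 := by
  unfold mip_alt
  rw [dif_pos ⟨hr, hc⟩]
  exact (needGo_spec w (w.length + (w.getD 0 []).length) 0 0 hr hc PySem.Dict.empty
    (by omega) (fun p v hv => by simp [PySem.Dict.get?_empty] at hv)).1

-- ---- A's staged table fill computes F (unchanged proof) ----

def Shape (dp : List (List Int)) (r c : Nat) : Prop :=
  dp.length = r ∧ ∀ row ∈ dp, row.length = c

theorem getD_mem {dp : List (List Int)} {i : Nat} (h : i < dp.length) : dp.getD i [] ∈ dp := by
  simp [List.getD_eq_getElem?_getD, List.getElem?_eq_getElem h]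

theorem shape_s2 {dp : List (List Int)} {r c : Nat} (h : Shape dp r c) (i j : Nat) (v : Int) :
    Shape (s2 dp i j v) r c := by
  obtain ⟨h1, h2⟩ := h
  refine ⟨by simp [s2, h1], ?_⟩
  intro row hrow
  rcases List.mem_or_eq_of_mem_set hrow with hm | hm
  · exact h2 _ hm
  · subst hm
    simp only [List.length_set]
    by_cases hi : i < dp.length
    · exact h2 _ (getD_mem hi)
    · have hid : s2 dp i j v = dp := by
        simp [s2, List.set_eq_of_length_le (le_of_not_gt hi)]
      rw [hid] at hrow
      simpa using h2 _ hrow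

theorem g2_s2 {dp : List (List Int)} {r c : Nat} (h : Shape dp r c) {i j : Nat}
    (hi : i < r) (hj : j < c) (v : Int) (i' j' : Nat) :
    g2 (s2 dp i j v) i' j' = if i' = i ∧ j' = j then v else g2 dp i' j' := by
  obtain ⟨h1, h2⟩ := h
  have hir : i < dp.length := h1 ▸ hi
  have hrow : (dp.getD i []).length = c := h2 _ (getD_mem hir)
  by_cases hii : i' = i
  · subst hii
    have hs : (s2 dp i' j v).getD i' [] = (dp.getD i' []).set j v := by
      simp [s2, List.getD_eq_getElem?_getD, List.getElem?_set_self hir]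
    unfold g2
    rw [hs]
    by_cases hjj : j' = j
    · subst hjj
      have hlen : j' < (dp.getD i' []).length := by rw [hrow]; exact hj
      rw [if_pos ⟨rfl, rfl⟩, List.getD_eq_getElem?_getD, List.getElem?_set_self hlen]
      rfl
    · rw [if_neg (by simp [hjj]), List.getD_eq_getElem?_getD,
        List.getElem?_set_ne (by omega : j ≠ j'), ← List.getD_eq_getElem?_getD]
  · have hs : (s2 dp i j v).getD i' [] = dp.getD i' [] := by
      simp [s2, List.getD_eq_getElem?_getD, List.getElem?_set_ne (by omega : i ≠ i')]
    unfold g2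
    rw [hs, if_neg (by simp [hii])]

-- A's first loop: filling the last column, bottom to top.
theorem phaseCol (w : List (List Int)) (hr : 1 ≤ w.length) (hc : 1 ≤ (w.getD 0 []).length) :
    ∀ n : Nat, ∀ i0 : Int, i0 + 1 = (n : Int) → i0 ≤ (w.length : Int) - 2 →
    ∀ dp : List (List Int), Shape dp w.length (w.getD 0 []).length →
    (∀ k : Nat, i0 < (k : Int) → k < w.length →
      g2 dp k ((w.getD 0 []).length - 1) = F w k ((w.getD 0 []).length - 1)) →
    (Shape ((PySem.List.pyRange i0 (-1) (-1)).foldl (fun dp i =>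
        s2 dp i.toNat ((w.getD 0 []).length - 1)
          (max (g2 dp (i.toNat + 1) ((w.getD 0 []).length - 1)
            - g2 w i.toNat ((w.getD 0 []).length - 1)) 1)) dp) w.length (w.getD 0 []).length) ∧
    (∀ k : Nat, k < w.length →
      g2 ((PySem.List.pyRange i0 (-1) (-1)).foldl (fun dp i =>
        s2 dp i.toNat ((w.getD 0 []).length - 1)
          (max (g2 dp (i.toNat + 1) ((w.getD 0 []).length - 1)
            - g2 w i.toNat ((w.getD 0 []).length - 1)) 1)) dp) k ((w.getD 0 []).length - 1)
        = F w k ((w.getD 0 []).length - 1)) ∧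
    (∀ k j : Nat, j ≠ (w.getD 0 []).length - 1 →
      g2 ((PySem.List.pyRange i0 (-1) (-1)).foldl (fun dp i =>
        s2 dp i.toNat ((w.getD 0 []).length - 1)
          (max (g2 dp (i.toNat + 1) ((w.getD 0 []).length - 1)
            - g2 w i.toNat ((w.getD 0 []).length - 1)) 1)) dp) k j = g2 dp k j) := by
  intro n
  induction n with
  | zero =>
    intro i0 hn hi0 dp hsh hcol
    rw [show PySem.List.pyRange i0 (-1) (-1) = [] from
      PySem.List.pyRange_neg_one_eq_nil (by omega), List.foldl_nil]
    exact ⟨hsh, fun k hk => hcol k (by omega) hk, fun _ _ _ => rfl⟩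
  | succ m ih =>
    intro i0 hn hi0 dp hsh hcol
    rw [show PySem.List.pyRange i0 (-1) (-1) = i0 :: PySem.List.pyRange (i0 - 1) (-1) (-1) from
      PySem.List.pyRange_neg_one_cons (by omega), List.foldl_cons]
    have hir : i0.toNat < w.length := by omega
    have hjc : (w.getD 0 []).length - 1 < (w.getD 0 []).length := by omega
    have hval : g2 dp (i0.toNat + 1) ((w.getD 0 []).length - 1)
        = F w (i0.toNat + 1) ((w.getD 0 []).length - 1) :=
      hcol (i0.toNat + 1) (by omega) (by omega)
    have hF : max (g2 dp (i0.toNat + 1) ((w.getD 0 []).length - 1)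
        - g2 w i0.toNat ((w.getD 0 []).length - 1)) 1
        = F w i0.toNat ((w.getD 0 []).length - 1) := by
      rw [hval, ← F_lastcol (by omega) (by omega)]
    have hstep := shape_s2 hsh i0.toNat ((w.getD 0 []).length - 1)
      (max (g2 dp (i0.toNat + 1) ((w.getD 0 []).length - 1)
        - g2 w i0.toNat ((w.getD 0 []).length - 1)) 1)
    obtain ⟨s1, s2', s3⟩ := ih (i0 - 1) (by omega) (by omega) _ hstep
      (fun k hk1 hk2 => by
        rw [g2_s2 hsh hir hjc]
        by_cases hki : k = i0.toNat
        · subst hki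
          rw [if_pos ⟨rfl, rfl⟩]
          exact hF
        · rw [if_neg (by tauto)]
          exact hcol k (by omega) hk2)
    refine ⟨s1, s2', fun k j hj => ?_⟩
    rw [s3 k j hj, g2_s2 hsh hir hjc, if_neg (by tauto)]

-- A's second loop: filling the last row, right to left.
theorem phaseRow (w : List (List Int)) (hr : 1 ≤ w.length) (hc : 1 ≤ (w.getD 0 []).length) :
    ∀ n : Nat, ∀ j0 : Int, j0 + 1 = (n : Int) → j0 ≤ ((w.getD 0 []).length : Int) - 2 →
    ∀ dp : List (List Int), Shape dp w.length (w.getD 0 []).length →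
    (∀ k : Nat, j0 < (k : Int) → k < (w.getD 0 []).length →
      g2 dp (w.length - 1) k = F w (w.length - 1) k) →
    (Shape ((PySem.List.pyRange j0 (-1) (-1)).foldl (fun dp j =>
        s2 dp (w.length - 1) j.toNat
          (max (g2 dp (w.length - 1) (j.toNat + 1) - g2 w (w.length - 1) j.toNat) 1)) dp)
        w.length (w.getD 0 []).length) ∧
    (∀ k : Nat, k < (w.getD 0 []).length →
      g2 ((PySem.List.pyRange j0 (-1) (-1)).foldl (fun dp j =>
        s2 dp (w.length - 1) j.toNat
          (max (g2 dp (w.length - 1) (j.toNat + 1) - g2 w (w.length - 1) j.toNat) 1)) dp)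
        (w.length - 1) k = F w (w.length - 1) k) ∧
    (∀ k j : Nat, k ≠ w.length - 1 →
      g2 ((PySem.List.pyRange j0 (-1) (-1)).foldl (fun dp j =>
        s2 dp (w.length - 1) j.toNat
          (max (g2 dp (w.length - 1) (j.toNat + 1) - g2 w (w.length - 1) j.toNat) 1)) dp)
        k j = g2 dp k j) := by
  intro n
  induction n with
  | zero =>
    intro j0 hn hj0 dp hsh hrow
    rw [show PySem.List.pyRange j0 (-1) (-1) = [] from
      PySem.List.pyRange_neg_one_eq_nil (by omega), List.foldl_nil]
    exact ⟨hsh, fun k hk => hrow k (by omega) hk, fun _ _ _ => rfl⟩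
  | succ m ih =>
    intro j0 hn hj0 dp hsh hrow
    rw [show PySem.List.pyRange j0 (-1) (-1) = j0 :: PySem.List.pyRange (j0 - 1) (-1) (-1) from
      PySem.List.pyRange_neg_one_cons (by omega), List.foldl_cons]
    have hir : w.length - 1 < w.length := by omega
    have hjc : j0.toNat < (w.getD 0 []).length := by omega
    have hval : g2 dp (w.length - 1) (j0.toNat + 1) = F w (w.length - 1) (j0.toNat + 1) :=
      hrow (j0.toNat + 1) (by omega) (by omega)
    have hF : max (g2 dp (w.length - 1) (j0.toNat + 1) - g2 w (w.length - 1) j0.toNat) 1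
        = F w (w.length - 1) j0.toNat := by
      rw [hval, ← F_lastrow (by omega) (by omega)]
    have hstep := shape_s2 hsh (w.length - 1) j0.toNat
      (max (g2 dp (w.length - 1) (j0.toNat + 1) - g2 w (w.length - 1) j0.toNat) 1)
    obtain ⟨s1, s2', s3⟩ := ih (j0 - 1) (by omega) (by omega) _ hstep
      (fun k hk1 hk2 => by
        rw [g2_s2 hsh hir hjc]
        by_cases hkj : k = j0.toNat
        · subst hkj
          rw [if_pos ⟨rfl, rfl⟩]
          exact hF
        · rw [if_neg (by tauto)]
          exact hrow k (by omega) hk2)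
    refine ⟨s1, s2', fun k j hk => ?_⟩
    rw [s3 k j hk, g2_s2 hsh hir hjc, if_neg (by tauto)]

-- A's nested loop, inner part: filling row i of the interior, right to left.
theorem phase4Inner (w : List (List Int)) (hc : 1 ≤ (w.getD 0 []).length) (i : Int)
    (hi0 : 0 ≤ i) (hi : i ≤ (w.length : Int) - 2) :
    ∀ n : Nat, ∀ j0 : Int, j0 + 1 = (n : Int) → j0 ≤ ((w.getD 0 []).length : Int) - 2 →
    ∀ dp : List (List Int), Shape dp w.length (w.getD 0 []).length →
    (∀ j : Nat, j < (w.getD 0 []).length → g2 dp (i.toNat + 1) j = F w (i.toNat + 1) j) →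
    (∀ k : Nat, j0 < (k : Int) → k < (w.getD 0 []).length →
      g2 dp i.toNat k = F w i.toNat k) →
    (Shape ((PySem.List.pyRange j0 (-1) (-1)).foldl (fun dp j =>
        let mex := min (g2 dp (i.toNat + 1) j.toNat) (g2 dp i.toNat (j.toNat + 1))
        s2 dp i.toNat j.toNat (max (mex - g2 w i.toNat j.toNat) 1)) dp)
        w.length (w.getD 0 []).length) ∧
    (∀ k : Nat, k < (w.getD 0 []).length →
      g2 ((PySem.List.pyRange j0 (-1) (-1)).foldl (fun dp j =>
        let mex := min (g2 dp (i.toNat + 1) j.toNat) (g2 dp i.toNat (j.toNat + 1))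
        s2 dp i.toNat j.toNat (max (mex - g2 w i.toNat j.toNat) 1)) dp)
        i.toNat k = F w i.toNat k) ∧
    (∀ k j : Nat, k ≠ i.toNat →
      g2 ((PySem.List.pyRange j0 (-1) (-1)).foldl (fun dp j =>
        let mex := min (g2 dp (i.toNat + 1) j.toNat) (g2 dp i.toNat (j.toNat + 1))
        s2 dp i.toNat j.toNat (max (mex - g2 w i.toNat j.toNat) 1)) dp)
        k j = g2 dp k j) := by
  intro n
  induction n with
  | zero =>
    intro j0 hn hj0 dp hsh hbelow hrow
    rw [show PySem.List.pyRange j0 (-1) (-1) = [] from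
      PySem.List.pyRange_neg_one_eq_nil (by omega), List.foldl_nil]
    exact ⟨hsh, fun k hk => hrow k (by omega) hk, fun _ _ _ => rfl⟩
  | succ m ih =>
    intro j0 hn hj0 dp hsh hbelow hrow
    rw [show PySem.List.pyRange j0 (-1) (-1) = j0 :: PySem.List.pyRange (j0 - 1) (-1) (-1) from
      PySem.List.pyRange_neg_one_cons (by omega), List.foldl_cons]
    have hir : i.toNat < w.length := by omega
    have hjc : j0.toNat < (w.getD 0 []).length := by omega
    have hF : max (min (g2 dp (i.toNat + 1) j0.toNat) (g2 dp i.toNat (j0.toNat + 1))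
        - g2 w i.toNat j0.toNat) 1 = F w i.toNat j0.toNat := by
      rw [hbelow j0.toNat (by omega), hrow (j0.toNat + 1) (by omega) (by omega),
        ← F_inner (by omega) (by omega)]
    have hstep := shape_s2 hsh i.toNat j0.toNat
      (max (min (g2 dp (i.toNat + 1) j0.toNat) (g2 dp i.toNat (j0.toNat + 1))
        - g2 w i.toNat j0.toNat) 1)
    obtain ⟨s1, s2', s3⟩ := ih (j0 - 1) (by omega) (by omega) _ hstep
      (fun j hj => by
        rw [g2_s2 hsh hir hjc, if_neg (by omega)]
        exact hbelow j hj)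
      (fun k hk1 hk2 => by
        rw [g2_s2 hsh hir hjc]
        by_cases hkj : k = j0.toNat
        · subst hkj
          rw [if_pos ⟨rfl, rfl⟩]
          exact hF
        · rw [if_neg (by tauto)]
          exact hrow k (by omega) hk2)
    refine ⟨s1, s2', fun k j hk => ?_⟩
    rw [s3 k j hk, g2_s2 hsh hir hjc, if_neg (by tauto)]

-- A's nested loop, outer part: filling the interior rows, bottom to top.
theorem phase4Outer (w : List (List Int)) (hr : 1 ≤ w.length) (hc : 1 ≤ (w.getD 0 []).length) :
    ∀ n : Nat, ∀ i0 : Int, i0 + 1 = (n : Int) → i0 ≤ (w.length : Int) - 2 →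
    ∀ dp : List (List Int), Shape dp w.length (w.getD 0 []).length →
    (∀ k : Nat, k < w.length →
      g2 dp k ((w.getD 0 []).length - 1) = F w k ((w.getD 0 []).length - 1)) →
    (∀ k j : Nat, i0 < (k : Int) → k < w.length → j < (w.getD 0 []).length →
      g2 dp k j = F w k j) →
    ∀ k j : Nat, k < w.length → j < (w.getD 0 []).length →
      g2 ((PySem.List.pyRange i0 (-1) (-1)).foldl (fun dp i =>
        (PySem.List.pyRange (((w.getD 0 []).length : Int) - 2) (-1) (-1)).foldl (fun dp j =>
          let mex := min (g2 dp (i.toNat + 1) j.toNat) (g2 dp i.toNat (j.toNat + 1))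
          s2 dp i.toNat j.toNat (max (mex - g2 w i.toNat j.toNat) 1)) dp) dp) k j = F w k j := by
  intro n
  induction n with
  | zero =>
    intro i0 hn hi0 dp hsh hcol hrows k j hk hj
    rw [show PySem.List.pyRange i0 (-1) (-1) = [] from
      PySem.List.pyRange_neg_one_eq_nil (by omega), List.foldl_nil]
    exact hrows k j (by omega) hk hj
  | succ m ih =>
    intro i0 hn hi0 dp hsh hcol hrows k j hk hj
    rw [show PySem.List.pyRange i0 (-1) (-1) = i0 :: PySem.List.pyRange (i0 - 1) (-1) (-1) from
      PySem.List.pyRange_neg_one_cons (by omega), List.foldl_cons]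
    obtain ⟨s1, s2', s3⟩ := phase4Inner w hc i0 (by omega) (by omega)
      ((w.getD 0 []).length - 1) (((w.getD 0 []).length : Int) - 2) (by omega) (by omega)
      dp hsh
      (fun j hj => hrows (i0.toNat + 1) j (by omega) (by omega) hj)
      (fun k hk1 hk2 => by
        have : k = (w.getD 0 []).length - 1 := by omega
        subst this
        exact hcol i0.toNat (by omega))
    exact ih (i0 - 1) (by omega) (by omega) _ s1
      (fun k hk => by
        by_cases hki : k = i0.toNat
        · subst hki
          exact s2' _ (by omega)
        · rw [s3 k _ hki]
          exact hcol k hk)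
      (fun k j hk1 hk2 hj => by
        by_cases hki : k = i0.toNat
        · subst hki
          exact s2' j hj
        · rw [s3 k j hki]
          exact hrows k j (by omega) hk2 hj) k j hk hj

theorem mip_eq (w : List (List Int)) (hr : 1 ≤ w.length) (hc : 1 ≤ (w.getD 0 []).length) :
    mip w = F w 0 0 := by
  have hsh0 : Shape ((List.range w.length).map
      (fun _ => (List.range (w.getD 0 []).length).map (fun _ => (0 : Int))))
      w.length (w.getD 0 []).length := by
    refine ⟨by simp, ?_⟩
    intro row hrow
    rw [List.mem_map] at hrow
    obtain ⟨a, -, rfl⟩ := hrow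
    simp
  have hval1 : (if g2 w (w.length - 1) ((w.getD 0 []).length - 1) > 0 then (1 : Int)
      else |g2 w (w.length - 1) ((w.getD 0 []).length - 1)| + 1)
      = F w (w.length - 1) ((w.getD 0 []).length - 1) := by
    rw [F_corner (by omega) (by omega)]
    by_cases hv : g2 w (w.length - 1) ((w.getD 0 []).length - 1) > 0
    · rw [if_pos hv]; omega
    · rw [if_neg hv, abs_of_nonpos (by omega)]; omega
  have hsh1 := shape_s2 hsh0 (w.length - 1) ((w.getD 0 []).length - 1)
    (if g2 w (w.length - 1) ((w.getD 0 []).length - 1) > 0 then (1 : Int)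
      else |g2 w (w.length - 1) ((w.getD 0 []).length - 1)| + 1)
  have hcol1 : ∀ k : Nat, (w.length : Int) - 2 < (k : Int) → k < w.length →
      g2 (s2 ((List.range w.length).map
        (fun _ => (List.range (w.getD 0 []).length).map (fun _ => (0 : Int))))
        (w.length - 1) ((w.getD 0 []).length - 1)
        (if g2 w (w.length - 1) ((w.getD 0 []).length - 1) > 0 then (1 : Int)
          else |g2 w (w.length - 1) ((w.getD 0 []).length - 1)| + 1))
        k ((w.getD 0 []).length - 1) = F w k ((w.getD 0 []).length - 1) := by
    intro k hk1 hk2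
    have hkr : k = w.length - 1 := by omega
    subst hkr
    rw [g2_s2 hsh0 (by omega) (by omega), if_pos ⟨rfl, rfl⟩]
    exact hval1
  obtain ⟨sh2, col2, -⟩ := phaseCol w hr hc (w.length - 1) ((w.length : Int) - 2)
    (by omega) (by omega) _ hsh1 hcol1
  obtain ⟨sh3, row3, pres3⟩ := phaseRow w hr hc ((w.getD 0 []).length - 1)
    (((w.getD 0 []).length : Int) - 2) (by omega) (by omega) _ sh2
    (fun k hk1 hk2 => by
      have hkc : k = (w.getD 0 []).length - 1 := by omega
      subst hkc
      exact col2 (w.length - 1) (by omega))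
  have col3 : ∀ k : Nat, k < w.length →
      g2 ((PySem.List.pyRange (((w.getD 0 []).length : Int) - 2) (-1) (-1)).foldl (fun dp j =>
        s2 dp (w.length - 1) j.toNat
          (max (g2 dp (w.length - 1) (j.toNat + 1) - g2 w (w.length - 1) j.toNat) 1))
        ((PySem.List.pyRange ((w.length : Int) - 2) (-1) (-1)).foldl (fun dp i =>
          s2 dp i.toNat ((w.getD 0 []).length - 1)
            (max (g2 dp (i.toNat + 1) ((w.getD 0 []).length - 1)
              - g2 w i.toNat ((w.getD 0 []).length - 1)) 1))
          (s2 ((List.range w.length).map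
            (fun _ => (List.range (w.getD 0 []).length).map (fun _ => (0 : Int))))
            (w.length - 1) ((w.getD 0 []).length - 1)
            (if g2 w (w.length - 1) ((w.getD 0 []).length - 1) > 0 then (1 : Int)
              else |g2 w (w.length - 1) ((w.getD 0 []).length - 1)| + 1))))
        k ((w.getD 0 []).length - 1) = F w k ((w.getD 0 []).length - 1) := fun k hk => by
    by_cases hkr : k = w.length - 1
    · subst hkr
      exact row3 ((w.getD 0 []).length - 1) (by omega)
    · rw [pres3 k ((w.getD 0 []).length - 1) hkr]
      exact col2 k hk
  have rows3 : ∀ k j : Nat, (w.length : Int) - 2 < (k : Int) → k < w.length →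
      j < (w.getD 0 []).length →
      g2 ((PySem.List.pyRange (((w.getD 0 []).length : Int) - 2) (-1) (-1)).foldl (fun dp j =>
        s2 dp (w.length - 1) j.toNat
          (max (g2 dp (w.length - 1) (j.toNat + 1) - g2 w (w.length - 1) j.toNat) 1))
        ((PySem.List.pyRange ((w.length : Int) - 2) (-1) (-1)).foldl (fun dp i =>
          s2 dp i.toNat ((w.getD 0 []).length - 1)
            (max (g2 dp (i.toNat + 1) ((w.getD 0 []).length - 1)
              - g2 w i.toNat ((w.getD 0 []).length - 1)) 1))
          (s2 ((List.range w.length).map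
            (fun _ => (List.range (w.getD 0 []).length).map (fun _ => (0 : Int))))
            (w.length - 1) ((w.getD 0 []).length - 1)
            (if g2 w (w.length - 1) ((w.getD 0 []).length - 1) > 0 then (1 : Int)
              else |g2 w (w.length - 1) ((w.getD 0 []).length - 1)| + 1))))
        k j = F w k j := fun k j hk1 hk2 hj => by
    have hkr : k = w.length - 1 := by omega
    subst hkr
    exact row3 j hj
  have final := phase4Outer w hr hc (w.length - 1) ((w.length : Int) - 2) (by omega) (by omega)
    _ sh3 col3 rows3 0 0 (by omega) (by omega)
  exact final

-- ===== VERDICT (by name: the statement is the Claim_ definition above) =====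
theorem mip_spec : Claim_equal_mip := by
  intro way _ hpre
  obtain ⟨hne, hc, -⟩ := hpre
  have hr : 1 ≤ way.length := List.length_pos_iff.mpr hne
  unfold Spec_mip
  rw [mip_eq way hr hc, mip_alt_eq way hr hc]
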